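-- pv_equiv track=rewrite | github.com/kenjieda-eng/electricity-risk-simulator | scripts/add_breadcrumb_jsonld.py | _find_jsx_tag_end
-- ===== SOURCE A (Python) =====
-- def _find_jsx_tag_end(s: str, start: int) -> int:
--     """Given position of '<' for a JSX opening tag, return index just past
--     the matching '>' (works with braces inside attribute values)."""
--     depth_brace = 0
--     i = start
--     in_string = None
--     escape = False
--     # move past '<'
--     while i < len(s):
--         ch = s[i]
--         if in_string is not None:
--             if escape:
--                 escape = False
--             elif ch == "\\":
--                 escape = True
--             elif ch == in_string:
--                 in_string = None
--         else:
--             if ch in ('"', "'", "`"):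
--                 in_string = ch
--             elif ch == "{":
--                 depth_brace += 1
--             elif ch == "}":
--                 depth_brace -= 1
--             elif ch == ">" and depth_brace == 0:
--                 return i + 1
--         i += 1
--     return -1
-- ===== SOURCE B (Python) =====
-- def _find_jsx_tag_end(s: str, start: int) -> int:
--     """Two staged passes: lex out string literals into a token list, then a
--     pure brace-depth scan over the tokens."""
--     depth = 0
--     for i, ch in _outside_strings(s, start):
--         if ch == "{":
--             depth += 1
--         elif ch == "}":
--             depth -= 1
--         elif depth == 0:  # ch == ">"
--             return i + 1
--     return -1
--
--
-- def _outside_strings(s, start):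
--     """First pass: the (index, char) pairs of every brace or '>' lying
--     outside a string literal, in order."""
--     out = []
--     n = len(s)
--     i = start
--     while i < n:
--         ch = s[i]
--         if ch in '"\'`':
--             i += 1
--             while i < n and s[i] != ch:
--                 i += 2 if s[i] == "\\" else 1
--             i += 1
--         else:
--             if ch in "{}>":
--                 out.append((i, ch))
--             i += 1
--     return out
-- ===== Notes on version B (the rewrite author's own statement) =====
-- stated objective: alternative
-- what changed: B splits A's single stateful scan into two staged passes: a lexer pass (_outside_strings) that skips string literals and materializes the ordered list of (index, char) tokens for braces and '>' outside strings, then a pure depth scan over that token list; A interleaves brace counting with in_string/escape flags in one character loop.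
import Mathlib
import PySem

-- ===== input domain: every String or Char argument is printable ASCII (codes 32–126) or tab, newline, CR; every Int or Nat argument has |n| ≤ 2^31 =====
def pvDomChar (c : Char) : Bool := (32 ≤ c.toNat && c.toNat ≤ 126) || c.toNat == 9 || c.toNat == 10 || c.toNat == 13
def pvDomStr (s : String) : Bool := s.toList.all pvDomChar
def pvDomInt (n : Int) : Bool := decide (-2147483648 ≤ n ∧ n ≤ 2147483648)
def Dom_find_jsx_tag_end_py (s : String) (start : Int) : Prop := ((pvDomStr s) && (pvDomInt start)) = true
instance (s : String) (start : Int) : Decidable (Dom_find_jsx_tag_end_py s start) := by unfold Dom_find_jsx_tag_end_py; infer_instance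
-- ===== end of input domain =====

-- B replaces A's single stateful scan by two staged passes: a lexer pass that strips string
-- literals and materializes the list of brace/'>' tokens, then a pure depth scan over that list.
-- Objective: alternative decomposition, same O(n) cost; return value only, no mutation.
-- Both loops use a fuel parameter (bounding remaining scan length) only to make them total.

-- ===== PORT A =====
-- the while loop of A: state (i, depth_brace, in_string, escape); fuel bounds the iterations
def pvLoopA (l : List Char) (fuel : Nat) (i : Int) (depth : Int) (ins : Option Char) (esc : Bool) : Int :=
  match fuel with
  | 0 => -1
  | f + 1 =>
    if i < (l.length : Int) then
      match PySem.List.pyGet? l i with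
      | none => -1        -- Python raises IndexError here; excluded by Pre_
      | some ch =>
        match ins with
        | some q =>
          if esc then pvLoopA l f (i+1) depth (some q) false
          else if ch = '\\' then pvLoopA l f (i+1) depth (some q) true
          else if ch = q then pvLoopA l f (i+1) depth none false
          else pvLoopA l f (i+1) depth (some q) esc
        | none =>
          if ch = '"' ∨ ch = '\'' ∨ ch = '`' then pvLoopA l f (i+1) depth (some ch) esc
          else if ch = '{' then pvLoopA l f (i+1) (depth+1) none esc
          else if ch = '}' then pvLoopA l f (i+1) (depth-1) none esc
          else if ch = '>' ∧ depth = 0 then i + 1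
          else pvLoopA l f (i+1) depth none esc
    else -1

def find_jsx_tag_end_py (s : String) (start : Int) : Int :=
  pvLoopA s.toList ((s.toList.length : Int) - start).toNat start 0 none false

-- ===== PORT B =====
-- the inner while of _outside_strings: advance j until the closing quote q or past the end
def pvSkipQ (l : List Char) (fuel : Nat) (q : Char) (j : Int) : Int :=
  match fuel with
  | 0 => j
  | f + 1 =>
    if j < (l.length : Int) then
      match PySem.List.pyGet? l j with
      | none => j         -- Python raises IndexError here; excluded by Pre_
      | some c =>
        if c = q then j
        else pvSkipQ l f q (if c = '\\' then j + 2 else j + 1)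
    else j

-- _outside_strings: the (index, char) pairs of every '{' '}' '>' outside string literals
def pvToks (l : List Char) (fuel : Nat) (i : Int) : List (Int × Char) :=
  match fuel with
  | 0 => []
  | f + 1 =>
    if i < (l.length : Int) then
      match PySem.List.pyGet? l i with
      | none => []        -- Python raises IndexError here; excluded by Pre_
      | some ch =>
        if ch = '"' ∨ ch = '\'' ∨ ch = '`' then pvToks l f (pvSkipQ l f ch (i+1) + 1)
        else if ch = '{' ∨ ch = '}' ∨ ch = '>' then (i, ch) :: pvToks l f (i+1)
        else pvToks l f (i+1)
    else []

-- second pass of B: pure depth scan over the token list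
def pvDepthScan : List (Int × Char) → Int → Int
  | [], _ => -1
  | (i, ch) :: rest, depth =>
    if ch = '{' then pvDepthScan rest (depth + 1)
    else if ch = '}' then pvDepthScan rest (depth - 1)
    else if depth = 0 then i + 1
    else pvDepthScan rest depth

def find_jsx_tag_end_py_alt (s : String) (start : Int) : Int :=
  pvDepthScan (pvToks s.toList ((s.toList.length : Int) - start).toNat start) 0

-- ===== PRECONDITION & SPEC =====
-- A raises IndexError iff start < -len(s) (negative indices down to -len wrap in Python);
-- exactly those inputs are excluded.
def Pre_find_jsx_tag_end_py (s : String) (start : Int) : Prop :=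
  -(s.toList.length : Int) ≤ start
instance (s : String) (start : Int) : Decidable (Pre_find_jsx_tag_end_py s start) := by
  unfold Pre_find_jsx_tag_end_py; infer_instance

def pvWitness_find_jsx_tag_end_py : String × Int := ("<a>", 0)

def Spec_find_jsx_tag_end_py (s : String) (start : Int) (out : Int) : Prop := out = find_jsx_tag_end_py_alt s start
instance (s : String) (start : Int) (out : Int) : Decidable (Spec_find_jsx_tag_end_py s start out) := by unfold Spec_find_jsx_tag_end_py; infer_instance

-- ===== CLAIM (what is proved, stated in full; the proofs are below) =====
def Claim_equal_find_jsx_tag_end_py : Prop := ∀ (s : String) (start : Int), Dom_find_jsx_tag_end_py s start → Pre_find_jsx_tag_end_py s start → Spec_find_jsx_tag_end_py s start (find_jsx_tag_end_py s start)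

-- ===== LEMMAS AND PROOFS =====

theorem pvSkipQ_ge (l : List Char) (q : Char) (f : Nat) (j : Int) :
    j ≤ pvSkipQ l f q j := by
  induction f generalizing j with
  | zero => simp [pvSkipQ]
  | succ g ih =>
    rw [pvSkipQ]
    by_cases hlt : j < (l.length : Int)
    · simp only [if_pos hlt]
      cases hg : PySem.List.pyGet? l j with
      | none => simp
      | some c =>
        simp only
        by_cases h1 : c = q
        · simp only [if_pos h1]
          omega
        · simp only [if_neg h1]
          by_cases h2 : c = '\\'
          · simp only [if_pos h2]; have := ih (j + 2); omega
          · simp only [if_neg h2]; have := ih (j + 1); omega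
    · simp only [if_neg hlt]
      omega

theorem pvLoopA_irrel (l : List Char) (f1 f2 : Nat) (i depth : Int) (ins : Option Char) (esc : Bool)
    (h1 : (l.length : Int) - i ≤ (f1 : Int)) (h2 : (l.length : Int) - i ≤ (f2 : Int)) :
    pvLoopA l f1 i depth ins esc = pvLoopA l f2 i depth ins esc := by
  induction f1 generalizing f2 i depth ins esc with
  | zero =>
    have hge : ¬ i < (l.length : Int) := by omega
    cases f2 with
    | zero => rfl
    | succ g2 => rw [pvLoopA, pvLoopA, if_neg hge]
  | succ g1 ih =>
    cases f2 with
    | zero =>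
      have hge : ¬ i < (l.length : Int) := by omega
      rw [pvLoopA, pvLoopA, if_neg hge]
    | succ g2 =>
      by_cases hlt : i < (l.length : Int)
      · rw [pvLoopA, pvLoopA, if_pos hlt, if_pos hlt]
        cases hg : PySem.List.pyGet? l i with
        | none => rfl
        | some ch =>
          cases ins with
          | some q =>
            simp only
            split_ifs with hc1 hc2 hc3
            · exact ih g2 (i+1) depth (some q) false (by omega) (by omega)
            · exact ih g2 (i+1) depth (some q) true (by omega) (by omega)
            · exact ih g2 (i+1) depth none false (by omega) (by omega)
            · exact ih g2 (i+1) depth (some q) esc (by omega) (by omega)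
          | none =>
            simp only
            split_ifs with hc1 hc2 hc3 hc4
            · exact ih g2 (i+1) depth (some ch) esc (by omega) (by omega)
            · exact ih g2 (i+1) (depth+1) none esc (by omega) (by omega)
            · exact ih g2 (i+1) (depth-1) none esc (by omega) (by omega)
            · rfl
            · exact ih g2 (i+1) depth none esc (by omega) (by omega)
      · rw [pvLoopA, pvLoopA, if_neg hlt, if_neg hlt]

-- pvToks from a position past the end is empty
theorem pvToks_empty (l : List Char) (f : Nat) (i : Int) (h : ¬ i < (l.length : Int)) :
    pvToks l f i = [] := by
  cases f with
  | zero => rw [pvToks]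
  | succ g => rw [pvToks, if_neg h]

-- A's in-string scan (escape cleared) equals B's lexical skip followed by resuming the main loop
theorem pvLoopA_string (l : List Char) (q : Char) (hq : q ≠ '\\') (f : Nat) (j depth : Int)
    (hf : (l.length : Int) - j ≤ (f : Int)) (hj : -(l.length : Int) ≤ j) :
    pvLoopA l f j depth (some q) false =
      (if pvSkipQ l f q j < (l.length : Int)
       then pvLoopA l f (pvSkipQ l f q j + 1) depth none false
       else -1) := by
  induction f generalizing j with
  | zero =>
    rw [pvLoopA, pvSkipQ, if_neg (show ¬ j < (l.length : Int) by omega)]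
  | succ g ih =>
    by_cases hlt : j < (l.length : Int)
    · rw [pvLoopA, pvSkipQ]
      simp only [if_pos hlt]
      cases hg : PySem.List.pyGet? l j with
      | none =>
        exfalso
        have := (PySem.List.pyGet?_eq_none_iff l j).mp hg
        simp [PySem.Raise.InRange] at this; omega
      | some c =>
        simp only [Bool.false_eq_true, if_false]
        by_cases h2 : c = q
        · -- closing quote: skip stops at j, A leaves string mode
          have hne : c ≠ '\\' := by rw [h2]; exact hq
          simp only [if_neg hne, if_pos h2, if_pos hlt]
          exact pvLoopA_irrel l g (g+1) (j+1) depth none false (by omega) (by omega)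
        · simp only [if_neg h2]
          by_cases h1 : c = '\\'
          · -- escape: A consumes the backslash and the following char
            simp only [if_pos h1]
            have hskip := pvSkipQ_ge l q g (j+2)
            cases g with
            | zero =>
              rw [pvLoopA]
              rw [if_neg (show ¬ pvSkipQ l 0 q (j+2) < (l.length : Int) by omega)]
            | succ g2 =>
              rw [pvLoopA]
              by_cases hlt2 : j + 1 < (l.length : Int)
              · simp only [if_pos hlt2]
                cases hg2 : PySem.List.pyGet? l (j+1) with
                | none =>
                  exfalso
                  have := (PySem.List.pyGet?_eq_none_iff l (j+1)).mp hg2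
                  simp [PySem.Raise.InRange] at this; omega
                | some c2 =>
                  simp only [reduceIte]
                  rw [show j + 1 + 1 = j + 2 from by ring]
                  rw [pvLoopA_irrel l g2 (g2+1) (j+2) depth (some q) false (by omega) (by omega)]
                  rw [ih (j+2) (by omega) (by omega)]
                  by_cases hr : pvSkipQ l (g2+1) q (j+2) < (l.length : Int)
                  · simp only [if_pos hr]
                    exact pvLoopA_irrel l (g2+1) (g2+1+1) _ depth none false (by omega) (by omega)
                  · simp only [if_neg hr]
              · simp only [if_neg hlt2]
                rw [if_neg (show ¬ pvSkipQ l (g2+1) q (j+2) < (l.length : Int) by omega)]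
          · simp only [if_neg h1]
            rw [ih (j+1) (by omega) (by omega)]
            have hge1 := pvSkipQ_ge l q g (j+1)
            by_cases hr : pvSkipQ l g q (j+1) < (l.length : Int)
            · simp only [if_pos hr]
              exact pvLoopA_irrel l g (g+1) _ depth none false (by omega) (by omega)
            · simp only [if_neg hr]
    · rw [pvLoopA, pvSkipQ]
      simp only [if_neg hlt]

theorem pvLoopA_eq_alt (l : List Char) (f : Nat) (i depth : Int)
    (hf : (l.length : Int) - i ≤ (f : Int)) (hi : -(l.length : Int) ≤ i) :
    pvLoopA l f i depth none false = pvDepthScan (pvToks l f i) depth := by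
  induction f generalizing i depth with
  | zero => rw [pvLoopA, pvToks]; rfl
  | succ g ih =>
    by_cases hlt : i < (l.length : Int)
    · rw [pvLoopA, pvToks]
      simp only [if_pos hlt]
      cases hg : PySem.List.pyGet? l i with
      | none => rfl
      | some ch =>
        simp only
        by_cases hq : ch = '"' ∨ ch = '\'' ∨ ch = '`'
        · simp only [if_pos hq]
          have hqne : ch ≠ '\\' := by rcases hq with h|h|h <;> subst h <;> decide
          rw [pvLoopA_string l ch hqne g (i+1) depth (by omega) (by omega)]
          have hge := pvSkipQ_ge l ch g (i+1)
          by_cases hrl : pvSkipQ l g ch (i+1) < (l.length : Int)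
          · simp only [if_pos hrl]
            exact ih (pvSkipQ l g ch (i+1) + 1) depth (by omega) (by omega)
          · simp only [if_neg hrl]
            rw [pvToks_empty l g _ (by omega)]
            rfl
        · simp only [if_neg hq]
          by_cases hb : ch = '{'
          · simp only [if_pos hb,
              if_pos (show ch = '{' ∨ ch = '}' ∨ ch = '>' from Or.inl hb)]
            rw [pvDepthScan]
            simp only [if_pos hb]
            exact ih (i+1) (depth+1) (by omega) (by omega)
          · simp only [if_neg hb]
            by_cases hc : ch = '}'
            · simp only [if_pos hc,
                if_pos (show ch = '{' ∨ ch = '}' ∨ ch = '>' from Or.inr (Or.inl hc))]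
              rw [pvDepthScan]
              simp only [if_neg hb, if_pos hc]
              exact ih (i+1) (depth-1) (by omega) (by omega)
            · simp only [if_neg hc]
              by_cases hd : ch = '>'
              · simp only [if_pos (show ch = '{' ∨ ch = '}' ∨ ch = '>' from Or.inr (Or.inr hd))]
                rw [pvDepthScan]
                simp only [if_neg hb, if_neg hc]
                by_cases hz : depth = 0
                · simp only [if_pos (show ch = '>' ∧ depth = 0 from ⟨hd, hz⟩), if_pos hz]
                · simp only [if_neg (show ¬ (ch = '>' ∧ depth = 0) from fun h => hz h.2),
                    if_neg hz]
                  exact ih (i+1) depth (by omega) (by omega)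
              · simp only [if_neg (show ¬ (ch = '>' ∧ depth = 0) from fun h => hd h.1),
                  if_neg (show ¬ (ch = '{' ∨ ch = '}' ∨ ch = '>') from by
                    rintro (h|h|h); exacts [hb h, hc h, hd h])]
                exact ih (i+1) depth (by omega) (by omega)
    · rw [pvLoopA, pvToks]
      simp only [if_neg hlt]
      rfl

-- ===== VERDICT (by name: the statement is the Claim_ definition above) =====
theorem find_jsx_tag_end_py_spec : Claim_equal_find_jsx_tag_end_py := by
  intro s start _ hpre
  unfold Spec_find_jsx_tag_end_py find_jsx_tag_end_py find_jsx_tag_end_py_alt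
  exact pvLoopA_eq_alt s.toList _ start 0 (by omega) hpre
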